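-- pv_equiv track=rewrite | github.com/vnim94/dsa | patterns/bit-manipulation/permCheck.py | permCheck
-- ===== SOURCE A (Python) =====
-- def permCheck(A):
--     # XOR array
--     a = 0
--     for i in range(len(A)):
--         a ^= A[i]
--     # XOR range
--     b = 0
--     for i in range(1, len(A) + 1):
--         b ^= i
--     # XOR both should = 0
--     return a ^ b == 0
-- ===== SOURCE B (Python) =====
-- def permCheck(A):
--     a = 0
--     for x in A:
--         a ^= x
--     n = len(A)
--     r = n % 4
--     if r == 0:
--         b = n
--     elif r == 1:
--         b = 1
--     elif r == 2:
--         b = n + 1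
--     else:
--         b = 0
--     return a ^ b == 0
-- ===== Notes on version B (the rewrite author's own statement) =====
-- stated objective: faster
-- what changed: The second loop XOR-ing 1..n is replaced by the O(1) closed form keyed on n % 4 (0->n, 1->1, 2->n+1, 3->0), and the element XOR iterates the list directly instead of indexing by range(len(A)).
import Mathlib
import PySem

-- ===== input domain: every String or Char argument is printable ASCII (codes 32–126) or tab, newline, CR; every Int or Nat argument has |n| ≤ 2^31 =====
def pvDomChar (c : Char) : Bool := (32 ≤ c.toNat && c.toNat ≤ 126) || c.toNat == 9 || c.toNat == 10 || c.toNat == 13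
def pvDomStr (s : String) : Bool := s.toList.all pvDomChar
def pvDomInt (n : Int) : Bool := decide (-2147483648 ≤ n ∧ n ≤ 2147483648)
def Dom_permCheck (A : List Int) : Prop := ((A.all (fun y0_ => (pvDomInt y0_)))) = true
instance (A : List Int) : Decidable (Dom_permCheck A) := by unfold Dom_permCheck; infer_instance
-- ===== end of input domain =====

-- B replaces the XOR of 1..n loop by the O(1) closed form keyed on n % 4 and folds over the list directly.


-- ===== PORT A =====
def permCheck (A : List Int) : Bool :=
  let a := (PySem.List.pyRange 0 (PySem.List.len A) 1).foldl
      (fun acc i => PySem.Int.bxor acc (PySem.List.pyGetD A i 0)) 0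
  let b := (PySem.List.pyRange 1 (PySem.List.len A + 1) 1).foldl
      (fun acc i => PySem.Int.bxor acc i) 0
  decide (PySem.Int.bxor a b = 0)

-- ===== PORT B =====
def permCheck_alt (A : List Int) : Bool :=
  let a := A.foldl (fun acc x => PySem.Int.bxor acc x) 0
  let n : Int := PySem.List.len A
  let r := PySem.Int.mod n 4
  let b : Int := if r = 0 then n else if r = 1 then 1 else if r = 2 then n + 1 else 0
  decide (PySem.Int.bxor a b = 0)

-- ===== PRECONDITION & SPEC =====
def Spec_permCheck (A : List Int) (out : Bool) : Prop := out = permCheck_alt A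
instance (A : List Int) (out : Bool) : Decidable (Spec_permCheck A out) := by unfold Spec_permCheck; infer_instance

-- ===== CLAIM (what is proved, stated in full; the proofs are below) =====
def Claim_equal_permCheck : Prop := ∀ (A : List Int), Dom_permCheck A → Spec_permCheck A (permCheck A)

-- ===== LEMMAS AND PROOFS =====

-- For even numbers, XOR with 1 just sets the low bit.
theorem pv_two_mul_xor_one (k : Nat) : 2 * k ^^^ 1 = 2 * k + 1 := by
  apply Nat.eq_of_testBit_eq
  intro i
  cases i with
  | zero => simp [Nat.testBit_zero]
  | succ i => simp [Nat.testBit_succ]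

theorem pv_even_xor_succ (k : Nat) : 2 * k ^^^ (2 * k + 1) = 1 := by
  rw [← pv_two_mul_xor_one, ← Nat.xor_assoc, Nat.xor_self, Nat.zero_xor]

-- closed form for XOR of 1..n
def pvG (n : Nat) : Nat :=
  match n % 4 with
  | 0 => n
  | 1 => 1
  | 2 => n + 1
  | _ => 0

theorem pvG_step (n : Nat) : pvG n ^^^ (n + 1) = pvG (n + 1) := by
  have h4 : n % 4 < 4 := Nat.mod_lt _ (by omega)
  interval_cases h : n % 4
  · have h' : (n + 1) % 4 = 1 := by omega
    obtain ⟨k, rfl⟩ : ∃ k, n = 2 * (2 * k) := ⟨n / 4, by omega⟩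
    simpa [pvG, h, h'] using pv_even_xor_succ (2 * k)
  · have h' : (n + 1) % 4 = 2 := by omega
    obtain ⟨k, rfl⟩ : ∃ k, n = 2 * (2 * k + 1) - 1 := ⟨n / 4, by omega⟩
    have hk : 2 * (2 * k + 1) - 1 + 1 = 2 * (2 * k + 1) := by omega
    have h'' : 2 * (2 * k + 1) % 4 = 2 := by omega
    simp only [pvG, h, hk, h'']
    rw [Nat.xor_comm]
    exact pv_two_mul_xor_one (2 * k + 1)
  · have h' : (n + 1) % 4 = 3 := by omega
    simp [pvG, h, h']
  · have h' : (n + 1) % 4 = 0 := by omega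
    simp [pvG, h, h']

theorem pv_fold_xor_range (n : Nat) :
    (PySem.List.pyRange 1 ((n : Int) + 1) 1).foldl (fun acc i => PySem.Int.bxor acc i) 0
      = (pvG n : Int) := by
  induction n with
  | zero => simp [PySem.List.pyRange_one_eq_nil, pvG]
  | succ n ih =>
      have h : PySem.List.pyRange 1 ((n : Int) + 1 + 1) 1
          = PySem.List.pyRange 1 ((n : Int) + 1) 1 ++ [(n : Int) + 1] := by
        have := PySem.List.pyRange_one_succ_right (a := 1) (b := (n : Int) + 1) (by omega)
        simpa using this
      push_cast
      rw [h, List.foldl_append, ih]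
      simp only [List.foldl]
      have : ((n : Int) + 1) = ((n + 1 : Nat) : Int) := by push_cast; ring
      rw [this, PySem.Int.bxor_natCast, pvG_step]

theorem pvB_closed (n : Nat) :
    (if PySem.Int.mod (n : Int) 4 = 0 then (n : Int)
     else if PySem.Int.mod (n : Int) 4 = 1 then 1
     else if PySem.Int.mod (n : Int) 4 = 2 then (n : Int) + 1 else 0) = (pvG n : Int) := by
  have hm : PySem.Int.mod (n : Int) 4 = ((n % 4 : Nat) : Int) := by
    exact_mod_cast PySem.Int.mod_natCast n 4
  rw [hm]
  have h4 : n % 4 < 4 := Nat.mod_lt _ (by omega)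
  interval_cases h : n % 4
  · simp [pvG, h]
  · simp [pvG, h]
  · simp [pvG, h]
  · simp [pvG, h]

-- ===== VERDICT (by name: the statement is the Claim_ definition above) =====
theorem permCheck_spec : Claim_equal_permCheck := by
  intro A _
  unfold Spec_permCheck permCheck permCheck_alt
  simp only [PySem.List.len_eq, decide_eq_decide]
  rw [PySem.List.foldl_pyRange_zero_pyGetD' A 0 (fun acc x => PySem.Int.bxor acc x) 0,
      pv_fold_xor_range A.length, pvB_closed A.length]
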